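-- pv_equiv track=rewrite | github.com/yym68686/oaix | oaix_gateway/token_import_jobs.py | _token_ids_from_import_items
-- ===== SOURCE A (Python) =====
-- from typing import Any, Awaitable, Callable, Protocol
--
-- def _token_ids_from_import_items(items: list[dict[str, Any]]) -> tuple[int, ...]:
--     def sort_key(item: dict[str, Any]) -> tuple[int, int]:
--         try:
--             return (int(item.get("index")), 0)
--         except (TypeError, ValueError):
--             return (2**31 - 1, 1)
--
--     token_ids: list[int] = []
--     seen: set[int] = set()
--     for item in sorted(items, key=sort_key):
--         try:
--             token_id = int(item.get("id"))
--         except (TypeError, ValueError):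
--             continue
--         if token_id <= 0 or token_id in seen:
--             continue
--         seen.add(token_id)
--         token_ids.append(token_id)
--     return tuple(token_ids)
-- ===== SOURCE B (Python) =====
-- def _token_ids_from_import_items(items):
--     # One pass: per token id keep the minimal (sort_key, original_index) rank,
--     # then sort only the deduplicated representatives by their stored rank.
--     best = {}
--     for i, item in enumerate(items):
--         try:
--             token_id = int(item.get("id"))
--         except (TypeError, ValueError):
--             continue
--         if token_id <= 0:
--             continue
--         try:
--             rank = (int(item.get("index")), 0, i)
--         except (TypeError, ValueError):
--             rank = (2**31 - 1, 1, i)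
--         prev = best.get(token_id)
--         if prev is None or rank < prev:
--             best[token_id] = rank
--     return tuple(t for t, _ in sorted(best.items(), key=lambda kv: kv[1]))
-- ===== Notes on version B (the rewrite author's own statement) =====
-- stated objective: alternative
-- what changed: Instead of stable-sorting all items by the tuple key and then deduplicating positive ids during one scan, B makes a single unsorted pass that keeps, per token id, the minimal (sort_key, original_index) rank in a dict, and then sorts only the deduplicated representatives by their stored rank.
import Mathlib
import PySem

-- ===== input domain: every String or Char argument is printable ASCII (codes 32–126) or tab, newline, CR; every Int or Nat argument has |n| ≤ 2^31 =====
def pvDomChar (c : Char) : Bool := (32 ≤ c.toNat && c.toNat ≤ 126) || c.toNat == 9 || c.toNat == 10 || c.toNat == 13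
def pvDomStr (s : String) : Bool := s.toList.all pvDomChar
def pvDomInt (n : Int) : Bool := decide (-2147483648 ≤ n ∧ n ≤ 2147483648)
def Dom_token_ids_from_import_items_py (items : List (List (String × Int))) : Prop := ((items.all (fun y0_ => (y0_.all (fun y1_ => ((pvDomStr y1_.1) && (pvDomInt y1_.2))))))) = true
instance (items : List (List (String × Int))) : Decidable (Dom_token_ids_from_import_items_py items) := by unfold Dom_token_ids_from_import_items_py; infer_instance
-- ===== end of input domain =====

-- B replaces A's stable sort of all items followed by in-scan dedup with one unsorted
-- pass keeping a minimal (sort_key, original_index) rank per token id in a dict,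
-- then sorts only the deduplicated representatives (objective: alternative algorithm).

-- ===== PORT A =====
-- sort_key(item): (int(item.get("index")), 0), or (2**31 - 1, 1) on TypeError/ValueError
-- (values are ints here, so int() only raises when the key is missing = lookup none)
def pySortKey (item : List (String × Int)) : Int × Int :=
  match item.lookup "index" with
  | some v => (v, 0)
  | none => (2147483647, 1)

def token_ids_from_import_items_py (items : List (List (String × Int))) : List Int :=
  ((PySem.List.sorted2 items (fun it => (pySortKey it).1) (fun it => (pySortKey it).2)).foldl
    (fun (st : PySem.Set Int × List Int) item =>
      match item.lookup "id" with
      | none => st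
      | some tid =>
        if tid ≤ 0 || PySem.Set.contains st.1 tid then st
        else (PySem.Set.add st.1 tid, st.2 ++ [tid]))
    (PySem.Set.empty, [])).2

-- ===== PORT B =====
-- Python tuple '<' on (Int, Int, Int), exact lexicographic comparison
def pyLexLt3 (a b : Int × Int × Int) : Bool :=
  decide (a.1 < b.1 ∨ (a.1 = b.1 ∧ (a.2.1 < b.2.1 ∨ (a.2.1 = b.2.1 ∧ a.2.2 < b.2.2))))

-- rank = (int(item.get("index")), 0, i) or (2**31 - 1, 1, i) on TypeError/ValueError
def pyRank (i : Int) (item : List (String × Int)) : Int × Int × Int :=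
  match item.lookup "index" with
  | some v => (v, 0, i)
  | none => (2147483647, 1, i)

def token_ids_from_import_items_py_alt (items : List (List (String × Int))) : List Int :=
  let best := (PySem.List.enumerate items).foldl
    (fun (d : PySem.Dict Int (Int × Int × Int)) p =>
      match p.2.lookup "id" with
      | none => d
      | some tid =>
        if tid ≤ 0 then d
        else
          let r := pyRank p.1 p.2
          match d.get? tid with
          | none => d.insert tid r
          | some r0 => if pyLexLt3 r r0 then d.insert tid r else d)
    PySem.Dict.empty
  -- sorted(best.items(), key=lambda kv: kv[1]) with a tuple key: insertion sort
  -- (the same shape as PySem.List.sorted) with Python's tuple '<', exact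
  (((PySem.Dict.items best).foldl
    (fun acc kv => PySem.List.insertBy (fun a b => pyLexLt3 a.2 b.2) kv acc) []).map (·.1))

-- ===== PRECONDITION & SPEC =====
def Spec_token_ids_from_import_items_py (items : List (List (String × Int))) (out : List Int) : Prop := out = token_ids_from_import_items_py_alt items
instance (items : List (List (String × Int))) (out : List Int) : Decidable (Spec_token_ids_from_import_items_py items out) := by unfold Spec_token_ids_from_import_items_py; infer_instance

-- ===== CLAIM (what is proved, stated in full; the proofs are below) =====
def Claim_equal_token_ids_from_import_items_py : Prop := ∀ (items : List (List (String × Int))), Dom_token_ids_from_import_items_py items → Spec_token_ids_from_import_items_py items (token_ids_from_import_items_py items)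

-- ===== LEMMAS AND PROOFS =====

-- ---- proof-side abbreviations ----

-- the valid positive token id of an item, if any (A's and B's shared skip condition)
def pvVid (it : List (String × Int)) : Option Int :=
  match it.lookup "id" with
  | some t => if t ≤ 0 then none else some t
  | none => none

-- scalar encoding of A's tuple sort key ((k,0) / (2^31-1,1) ↦ 2k / 2(2^31-1)+1)
def pvEk (it : List (String × Int)) : Int := 2 * (pySortKey it).1 + (pySortKey it).2

-- valid entry of an enumerated item: (rank, id)
def pvG (p : Int × List (String × Int)) : Option ((Int × Int × Int) × Int) :=
  match pvVid p.2 with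
  | some t => some (pyRank p.1 p.2, t)
  | none => none

-- the valid entries, in original order
def pvV (items : List (List (String × Int))) : List ((Int × Int × Int) × Int) :=
  (PySem.List.enumerate items).filterMap pvG

-- scalar encoding of a rank (strictly monotone for lex order when flags ∈ {0,1}, idx ∈ [0,N))
def pvEnc (N : Int) (r : Int × Int × Int) : Int := (2 * r.1 + r.2.1) * N + r.2.2

-- the valid entries sorted strictly by encoded rank
def pvW (items : List (List (String × Int))) : List ((Int × Int × Int) × Int) :=
  PySem.List.sorted (pvV items) (fun e => pvEnc items.length e.1) false

-- first-occurrence (per id) extraction, keeping (id, rank)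
def pvFo : List ((Int × Int × Int) × Int) → PySem.Set Int → List (Int × (Int × Int × Int))
  | [], _ => []
  | e :: l, s =>
    if PySem.Set.contains s e.2 then pvFo l s
    else (e.2, e.1) :: pvFo l (PySem.Set.add s e.2)

-- A's dedup loop, recursively
def pvGoA : List (List (String × Int)) → PySem.Set Int → List Int
  | [], _ => []
  | it :: l, s =>
    match pvVid it with
    | none => pvGoA l s
    | some t => if PySem.Set.contains s t then pvGoA l s else t :: pvGoA l (PySem.Set.add s t)

-- B's running minimum of ranks
def pvMin (o : Option (Int × Int × Int)) (l : List (Int × Int × Int)) : Option (Int × Int × Int) :=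
  l.foldl (fun o r => match o with
    | none => some r
    | some r0 => if pyLexLt3 r r0 then some r else some r0) o

-- ranks of the occurrences of id t in a valid-entry list
def pvOcc (v : List ((Int × Int × Int) × Int)) (t : Int) : List (Int × Int × Int) :=
  v.filterMap (fun e => if e.2 = t then some e.1 else none)

-- B's dict step, on valid entries
def pvStepB (d : PySem.Dict Int (Int × Int × Int)) (e : (Int × Int × Int) × Int) :
    PySem.Dict Int (Int × Int × Int) :=
  match d.get? e.2 with
  | none => d.insert e.2 e.1
  | some r0 => if pyLexLt3 e.1 r0 then d.insert e.2 e.1 else d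

-- ---- order facts about pyLexLt3 ----

theorem pv_lex_irrefl (a : Int × Int × Int) : pyLexLt3 a a = false := by
  simp only [pyLexLt3, decide_eq_false_iff_not]; omega

theorem pv_lex_asymm {a b : Int × Int × Int} (h : pyLexLt3 a b = true) : pyLexLt3 b a = false := by
  simp only [pyLexLt3, decide_eq_true_eq] at h
  simp only [pyLexLt3, decide_eq_false_iff_not]; omega

theorem pv_lex_trans {a b c : Int × Int × Int} (h1 : pyLexLt3 a b = true) (h2 : pyLexLt3 b c = true) :
    pyLexLt3 a c = true := by
  simp only [pyLexLt3, decide_eq_true_eq] at *; omega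

theorem pv_lex_total {a b : Int × Int × Int} (h : a ≠ b) :
    pyLexLt3 a b = true ∨ pyLexLt3 b a = true := by
  obtain ⟨a1, a2, a3⟩ := a; obtain ⟨b1, b2, b3⟩ := b
  simp only [pyLexLt3, decide_eq_true_eq]
  simp only [ne_eq, Prod.mk.injEq, not_and] at h
  omega

-- ---- A1: the tuple-key sort is the scalar-key sort ----

theorem pv_flag01 (it : List (String × Int)) : (pySortKey it).2 = 0 ∨ (pySortKey it).2 = 1 := by
  unfold pySortKey; cases it.lookup "index" <;> simp

theorem pv_sorted2_eq (items : List (List (String × Int))) :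
    PySem.List.sorted2 items (fun it => (pySortKey it).1) (fun it => (pySortKey it).2)
      = PySem.List.sorted items pvEk false := by
  have hc : (fun a b => decide ((pySortKey a).1 < (pySortKey b).1) ||
      !decide ((pySortKey b).1 < (pySortKey a).1) && decide ((pySortKey a).2 < (pySortKey b).2))
      = fun a b => decide (pvEk a < pvEk b) := by
    funext a b
    rcases pv_flag01 a with ha | ha <;> rcases pv_flag01 b with hb | hb <;>
      · rw [Bool.eq_iff_iff]
        simp only [Bool.or_eq_true, Bool.and_eq_true, Bool.not_eq_true', decide_eq_true_eq,
          decide_eq_false_iff_not, pvEk, ha, hb]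
        omega
  show List.foldl _ [] items = List.foldl _ [] items
  rw [hc]

-- ---- enumerate facts ----

theorem pv_enum_cons (x : α) (xs : List α) (i : Int) :
    PySem.List.enumerate (x :: xs) i = (i, x) :: PySem.List.enumerate xs (i + 1) := rfl

theorem pv_enum_bounds (xs : List α) (i : Int) :
    ∀ p ∈ PySem.List.enumerate xs i, i ≤ p.1 ∧ p.1 < i + xs.length := by
  induction xs generalizing i with
  | nil => simp [PySem.List.enumerate]
  | cons x xs ih =>
    intro p hp
    rw [pv_enum_cons] at hp
    rcases List.mem_cons.mp hp with hp | hp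
    · subst hp; simp
    · have := ih (i + 1) p hp
      simp only [List.length_cons]
      push_cast at this ⊢
      omega

theorem pv_enum_pairwise (xs : List α) (i : Int) :
    (PySem.List.enumerate xs i).Pairwise (fun p q => p.1 < q.1) := by
  induction xs generalizing i with
  | nil => simp [PySem.List.enumerate]
  | cons x xs ih =>
    rw [pv_enum_cons, List.pairwise_cons]
    refine ⟨fun q hq => ?_, ih (i + 1)⟩
    have := pv_enum_bounds xs (i + 1) q hq
    omega

-- ---- key arithmetic ----

theorem pv_key_lt_iff {N a b i j : Int} (hi : 0 ≤ i) (hiN : i < N) (hj : 0 ≤ j) (hjN : j < N) :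
    a * N + i < b * N + j ↔ (a < b ∨ (a = b ∧ i < j)) := by
  constructor
  · intro h
    rcases lt_trichotomy a b with hab | hab | hab
    · exact Or.inl hab
    · exact Or.inr ⟨hab, by subst hab; linarith⟩
    · exfalso
      have h1 : b + 1 ≤ a := hab
      have h2 : (b + 1) * N ≤ a * N := by
        apply mul_le_mul_of_nonneg_right h1; omega
      nlinarith
  · rintro (hab | ⟨rfl, hij⟩)
    · have h1 : a + 1 ≤ b := hab
      have h2 : (a + 1) * N ≤ b * N := by
        apply mul_le_mul_of_nonneg_right h1; omega
      nlinarith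
    · linarith

theorem pv_key_eq_iff {N a b i j : Int} (hi : 0 ≤ i) (hiN : i < N) (hj : 0 ≤ j) (hjN : j < N) :
    a * N + i = b * N + j ↔ (a = b ∧ i = j) := by
  constructor
  · intro h
    have h1 : ¬ (a * N + i < b * N + j) := by omega
    have h2 : ¬ (b * N + j < a * N + i) := by omega
    rw [pv_key_lt_iff hi hiN hj hjN] at h1
    rw [pv_key_lt_iff hj hjN hi hiN] at h2
    constructor
    · omega
    · have hab : a = b := by omega
      subst hab; omega
  · rintro ⟨rfl, rfl⟩; rfl

theorem pv_enc_rank (N i : Int) (it : List (String × Int)) :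
    pvEnc N (pyRank i it) = pvEk it * N + i := by
  unfold pvEnc pyRank pvEk pySortKey
  cases it.lookup "index" <;> simp

-- lex order on ranks agrees with the scalar encoding, under the bounds
theorem pv_enc_lt_iff_lex {N : Int} {r r' : Int × Int × Int}
    (hb : r.2.1 = 0 ∨ r.2.1 = 1) (hb' : r'.2.1 = 0 ∨ r'.2.1 = 1)
    (hi : 0 ≤ r.2.2) (hiN : r.2.2 < N) (hj : 0 ≤ r'.2.2) (hjN : r'.2.2 < N) :
    pvEnc N r < pvEnc N r' ↔ pyLexLt3 r r' = true := by
  obtain ⟨a, b, c⟩ := r; obtain ⟨a', b', c'⟩ := r'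
  simp only at hb hb' hi hiN hj hjN
  unfold pvEnc pyLexLt3
  simp only [decide_eq_true_eq]
  rw [pv_key_lt_iff hi hiN hj hjN]
  omega

-- ---- A2: stability — sorting items equals sorting enumerated items by (key, index) ----

theorem pv_insertBy_map_snd {N i : Int} (x : List (String × Int))
    (acc : List (Int × List (String × Int))) (hi : 0 ≤ i) (hiN : i < N)
    (hacc : ∀ p ∈ acc, 0 ≤ p.1 ∧ p.1 < i) :
    (PySem.List.insertBy (fun a b => decide (pvEk a.2 * N + a.1 < pvEk b.2 * N + b.1)) (i, x) acc).map (·.2)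
      = PySem.List.insertBy (fun a b => decide (pvEk a < pvEk b)) x (acc.map (·.2)) := by
  induction acc with
  | nil => simp [PySem.List.insertBy]
  | cons q acc ih =>
    have hq := hacc q (by simp)
    have hq1N : q.1 < N := by omega
    by_cases h : pvEk x < pvEk q.2
    · have hkey : pvEk x * N + i < pvEk q.2 * N + q.1 := by
        rw [pv_key_lt_iff hi hiN hq.1 hq1N]; exact Or.inl h
      simp [PySem.List.insertBy, h, hkey]
    · have hkey : ¬ (pvEk x * N + i < pvEk q.2 * N + q.1) := by
        rw [pv_key_lt_iff hi hiN hq.1 hq1N]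
        rintro (hk | ⟨_, hk⟩)
        · exact h hk
        · omega
      have ihh := ih (fun p hp => hacc p (List.mem_cons_of_mem _ hp))
      simp [PySem.List.insertBy, h, hkey, ihh]

theorem pv_stab_fold (N : Int) :
    ∀ (xs : List (List (String × Int))) (i : Int) (acc : List (Int × List (String × Int))),
      0 ≤ i → i + xs.length ≤ N → (∀ p ∈ acc, 0 ≤ p.1 ∧ p.1 < i) →
      ((PySem.List.enumerate xs i).foldl
          (fun acc p => PySem.List.insertBy (fun a b => decide (pvEk a.2 * N + a.1 < pvEk b.2 * N + b.1)) p acc) acc).map (·.2)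
        = xs.foldl (fun a x => PySem.List.insertBy (fun a b => decide (pvEk a < pvEk b)) x a) (acc.map (·.2)) := by
  intro xs
  induction xs with
  | nil => intro i acc _ _ _; simp [PySem.List.enumerate]
  | cons x xs ih =>
    intro i acc hi hlen hacc
    rw [pv_enum_cons]
    simp only [List.foldl_cons]
    have hiN : i < N := by
      simp only [List.length_cons] at hlen; push_cast at hlen; omega
    have hinv : ∀ p ∈ PySem.List.insertBy
        (fun a b => decide (pvEk a.2 * N + a.1 < pvEk b.2 * N + b.1)) (i, x) acc,
        0 ≤ p.1 ∧ p.1 < i + 1 := by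
      intro p hp
      rcases (PySem.List.mem_insertBy _ _ _ _).mp hp with rfl | hp
      · exact ⟨hi, by omega⟩
      · have := hacc p hp; omega
    have hlen' : i + 1 + (xs.length : Int) ≤ N := by
      simp only [List.length_cons] at hlen; push_cast at hlen; omega
    rw [ih (i + 1) _ (by omega) hlen' hinv,
        pv_insertBy_map_snd x acc hi hiN hacc]

theorem pv_stab_main (items : List (List (String × Int))) :
    PySem.List.sorted items pvEk false
      = (PySem.List.sorted (PySem.List.enumerate items)
          (fun p => pvEk p.2 * items.length + p.1) false).map (·.2) := by
  rw [PySem.List.sorted_eq_foldl_insertBy items pvEk,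
      PySem.List.sorted_eq_foldl_insertBy (PySem.List.enumerate items)
        (fun p => pvEk p.2 * (items.length : Int) + p.1)]
  exact (pv_stab_fold (items.length) items 0 [] le_rfl (by simp) (by simp)).symm

-- ---- A's fold = pvGoA, and pvGoA = pvFo over the valid entries ----

theorem pv_foldA_eq (l : List (List (String × Int))) :
    ∀ (s : PySem.Set Int) (out : List Int),
      (l.foldl
        (fun (st : PySem.Set Int × List Int) item =>
          match item.lookup "id" with
          | none => st
          | some tid =>
            if tid ≤ 0 || PySem.Set.contains st.1 tid then st
            else (PySem.Set.add st.1 tid, st.2 ++ [tid]))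
        (s, out)).2 = out ++ pvGoA l s := by
  induction l with
  | nil => intro s out; simp [pvGoA]
  | cons it l ih =>
    intro s out
    simp only [List.foldl_cons]
    cases h : it.lookup "id" with
    | none =>
      rw [show pvGoA (it :: l) s = pvGoA l s from by simp [pvGoA, pvVid, h]]
      simpa [h] using ih s out
    | some tid =>
      by_cases h0 : tid ≤ 0
      · rw [show pvGoA (it :: l) s = pvGoA l s from by simp [pvGoA, pvVid, h, h0]]
        simpa [h, h0] using ih s out
      · by_cases hc : tid ∈ s
        · rw [show pvGoA (it :: l) s = pvGoA l s from by
            simp [pvGoA, pvVid, PySem.Set.contains, h, h0, hc]]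
          simpa [h, h0, hc] using ih s out
        · rw [show pvGoA (it :: l) s = tid :: pvGoA l (PySem.Set.add s tid) from by
            simp [pvGoA, pvVid, PySem.Set.contains, h, h0, hc]]
          have hih := ih (PySem.Set.add s tid) (out ++ [tid])
          simp [h0, hc] at hih ⊢
          simp [hih]

theorem pv_goA_map_fo (l : List (Int × List (String × Int))) :
    ∀ s, pvGoA (l.map (·.2)) s = (pvFo (l.filterMap pvG) s).map (·.1) := by
  induction l with
  | nil => intro s; simp [pvGoA, pvFo]
  | cons p l ih =>
    intro s
    simp only [List.map_cons, List.filterMap_cons]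
    cases h : pvVid p.2 with
    | none =>
      rw [show pvGoA (p.2 :: l.map (·.2)) s = pvGoA (l.map (·.2)) s from by
        simp [pvGoA, h]]
      rw [show pvG p = none from by unfold pvG; rw [h]]
      exact ih s
    | some t =>
      rw [show pvG p = some (pyRank p.1 p.2, t) from by unfold pvG; rw [h]]
      by_cases hc : t ∈ s
      · rw [show pvGoA (p.2 :: l.map (·.2)) s = pvGoA (l.map (·.2)) s from by
          simp [pvGoA, PySem.Set.contains, h, hc]]
        rw [show pvFo ((pyRank p.1 p.2, t) :: l.filterMap pvG) s = pvFo (l.filterMap pvG) s from by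
          simp [pvFo, PySem.Set.contains, hc]]
        exact ih s
      · rw [show pvGoA (p.2 :: l.map (·.2)) s = t :: pvGoA (l.map (·.2)) (PySem.Set.add s t) from by
          simp [pvGoA, PySem.Set.contains, h, hc]]
        rw [show pvFo ((pyRank p.1 p.2, t) :: l.filterMap pvG) s
            = (t, pyRank p.1 p.2) :: pvFo (l.filterMap pvG) (PySem.Set.add s t) from by
          simp [pvFo, PySem.Set.contains, hc]]
        simp [ih (PySem.Set.add s t)]

-- ---- the filtered stable sort is pvW ----

theorem pv_G_inv {p : Int × List (String × Int)} {e : (Int × Int × Int) × Int}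
    (h : pvG p = some e) : pvVid p.2 = some e.2 ∧ e.1 = pyRank p.1 p.2 := by
  unfold pvG at h
  cases hv : pvVid p.2 <;> rw [hv] at h
  · simp at h
  · simp only [Option.some.injEq] at h
    refine ⟨?_, ?_⟩ <;> rw [← h]


theorem pv_G_rank {p : Int × List (String × Int)} {e : (Int × Int × Int) × Int}
    (h : pvG p = some e) : e.1 = pyRank p.1 p.2 := (pv_G_inv h).2

theorem pv_S_pairwise_strict (items : List (List (String × Int))) :
    (PySem.List.sorted (PySem.List.enumerate items)
        (fun p => pvEk p.2 * items.length + p.1) false).Pairwise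
      (fun p q => pvEk p.2 * (items.length : Int) + p.1 < pvEk q.2 * items.length + q.1) := by
  have hle := PySem.List.sorted_pairwise (PySem.List.enumerate items)
    (fun p => pvEk p.2 * (items.length : Int) + p.1)
  have hperm := PySem.List.sorted_perm (PySem.List.enumerate items)
    (fun p => pvEk p.2 * (items.length : Int) + p.1) false
  have hnodupE : ((PySem.List.enumerate items).map (·.1)).Nodup :=
    List.pairwise_map.mpr ((pv_enum_pairwise items 0).imp (fun h => ne_of_lt h))
  have hnodupS := (List.Perm.nodup_iff (hperm.map (·.1))).mpr hnodupE
  have hne : (PySem.List.sorted (PySem.List.enumerate items)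
      (fun p => pvEk p.2 * (items.length : Int) + p.1) false).Pairwise
      (fun p q => p.1 ≠ q.1) := List.pairwise_map.mp hnodupS
  refine (hle.and hne).imp_of_mem ?_
  intro a b ha hb ⟨h1, h2⟩
  have hba := pv_enum_bounds items 0 a (hperm.subset ha)
  have hbb := pv_enum_bounds items 0 b (hperm.subset hb)
  rcases lt_or_eq_of_le h1 with h | h
  · exact h
  · exfalso
    have := (pv_key_eq_iff (N := (items.length : Int)) (by omega) (by omega) (by omega)
      (by omega)).mp h
    exact h2 this.2

theorem pv_SV_eq_W (items : List (List (String × Int))) :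
    (PySem.List.sorted (PySem.List.enumerate items)
        (fun p => pvEk p.2 * items.length + p.1) false).filterMap pvG = pvW items := by
  refine (PySem.List.sorted_eq_of_perm_of_pairwise_lt _ _ _ ?_ ?_).symm
  · exact List.Perm.filterMap pvG (PySem.List.sorted_perm _ _ _)
  · rw [List.pairwise_filterMap]
    refine (pv_S_pairwise_strict items).imp ?_
    intro a b h e he f hf
    rw [pv_G_rank he, pv_G_rank hf, pv_enc_rank, pv_enc_rank]
    exact h

-- ---- pvFo lemmas ----

theorem pv_fo_sublist (l : List ((Int × Int × Int) × Int)) :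
    ∀ s, ((pvFo l s).map (fun q => (q.2, q.1))).Sublist l := by
  induction l with
  | nil => intro s; simp [pvFo]
  | cons e l ih =>
    intro s
    by_cases hc : e.2 ∈ s
    · rw [show pvFo (e :: l) s = pvFo l s from by simp [pvFo, PySem.Set.contains, hc]]
      exact (ih s).cons e
    · rw [show pvFo (e :: l) s = (e.2, e.1) :: pvFo l (PySem.Set.add s e.2) from by
        simp [pvFo, PySem.Set.contains, hc]]
      simpa using (ih (PySem.Set.add s e.2)).cons₂ e

theorem pv_fo_pairwise {l : List ((Int × Int × Int) × Int)} (s : PySem.Set Int)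
    (h : l.Pairwise (fun a b => pyLexLt3 a.1 b.1 = true)) :
    (pvFo l s).Pairwise (fun a b => pyLexLt3 a.2 b.2 = true) := by
  have := List.pairwise_map.mp (List.Pairwise.sublist (pv_fo_sublist l s) h)
  exact this

theorem pv_fo_not_seen (l : List ((Int × Int × Int) × Int)) :
    ∀ s t r, (t, r) ∈ pvFo l s → PySem.Set.contains s t = false := by
  induction l with
  | nil => intro s t r h; simp [pvFo] at h
  | cons e l ih =>
    intro s t r h
    by_cases hc : e.2 ∈ s
    · rw [show pvFo (e :: l) s = pvFo l s from by simp [pvFo, PySem.Set.contains, hc]] at h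
      exact ih s t r h
    · rw [show pvFo (e :: l) s = (e.2, e.1) :: pvFo l (PySem.Set.add s e.2) from by
        simp [pvFo, PySem.Set.contains, hc]] at h
      rcases List.mem_cons.mp h with h | h
      · obtain ⟨rfl, rfl⟩ : t = e.2 ∧ r = e.1 := by simpa [Prod.ext_iff] using h
        simp [PySem.Set.contains, hc]
      · have hns := ih _ t r h
        simp only [PySem.Set.contains, Bool.eq_false_iff, ne_eq, List.contains_iff_mem] at hns ⊢
        intro hmem
        exact hns ((PySem.Set.mem_add s e.2 t).mpr (Or.inl hmem))

theorem pv_fo_mem_iff (l : List ((Int × Int × Int) × Int)) :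
    ∀ s, l.Pairwise (fun a b => pyLexLt3 a.1 b.1 = true) → ∀ t r,
      ((t, r) ∈ pvFo l s ↔
        PySem.Set.contains s t = false ∧ (r, t) ∈ l ∧
          ∀ e ∈ l, e.2 = t → e.1 = r ∨ pyLexLt3 r e.1 = true) := by
  induction l with
  | nil => intro s _ t r; simp [pvFo]
  | cons e l ih =>
    intro s hpw t r
    rcases List.pairwise_cons.mp hpw with ⟨he, hl⟩
    by_cases hc : e.2 ∈ s
    · rw [show pvFo (e :: l) s = pvFo l s from by simp [pvFo, PySem.Set.contains, hc]]
      rw [ih s hl t r]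
      by_cases ht : e.2 = t
      · subst ht
        constructor <;>
          · rintro ⟨hcf, -, -⟩
            exact absurd hcf (by simp [PySem.Set.contains, hc])
      · constructor
        · rintro ⟨hcf, hmem, hall⟩
          refine ⟨hcf, List.mem_cons_of_mem _ hmem, ?_⟩
          intro f hf hft
          rcases List.mem_cons.mp hf with rfl | hf
          · exact absurd hft ht
          · exact hall f hf hft
        · rintro ⟨hcf, hmem, hall⟩
          refine ⟨hcf, ?_, fun f hf hft => hall f (List.mem_cons_of_mem _ hf) hft⟩
          rcases List.mem_cons.mp hmem with hme | hme
          · exact absurd (by rw [← hme]) ht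
          · exact hme
    · rw [show pvFo (e :: l) s = (e.2, e.1) :: pvFo l (PySem.Set.add s e.2) from by
        simp [pvFo, PySem.Set.contains, hc]]
      by_cases ht : e.2 = t
      · subst ht
        constructor
        · intro hmem
          rcases List.mem_cons.mp hmem with hme | hme
          · obtain ⟨-, rfl⟩ : e.2 = e.2 ∧ r = e.1 := by simpa [Prod.ext_iff] using hme
            refine ⟨by simp [PySem.Set.contains, hc], List.mem_cons_self, ?_⟩
            intro f hf hft
            rcases List.mem_cons.mp hf with rfl | hf
            · exact Or.inl rfl
            · exact Or.inr (he f hf)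
          · exfalso
            have := pv_fo_not_seen l _ _ _ hme
            simp [PySem.Set.contains, PySem.Set.mem_add] at this
        · rintro ⟨hcf, hmem, hall⟩
          have hre : r = e.1 := by
            rcases List.mem_cons.mp hmem with hme | hme
            · rw [← hme]
            · have h1 := he _ hme
              rcases hall e (List.mem_cons_self) rfl with h2 | h2
              · exact h2.symm
              · exfalso; simp [pv_lex_asymm h2] at h1
          subst hre
          exact List.mem_cons_self
      · constructor
        · intro hmem
          rcases List.mem_cons.mp hmem with hme | hme
          · exact absurd ((by simpa [Prod.ext_iff] using hme : t = e.2 ∧ r = e.1)).1.symm ht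
          · obtain ⟨hcf, hm2, hall⟩ := (ih (PySem.Set.add s e.2) hl t r).mp hme
            refine ⟨?_, List.mem_cons_of_mem _ hm2, ?_⟩
            · simp only [PySem.Set.contains, Bool.eq_false_iff, ne_eq,
                List.contains_iff_mem] at hcf ⊢
              intro hmm; exact hcf ((PySem.Set.mem_add _ _ _).mpr (Or.inl hmm))
            · intro f hf hft
              rcases List.mem_cons.mp hf with rfl | hf
              · exact absurd hft ht
              · exact hall f hf hft
        · rintro ⟨hcf, hmem, hall⟩
          have hm2 : (r, t) ∈ l := by
            rcases List.mem_cons.mp hmem with hme | hme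
            · exact absurd (by rw [← hme]) ht
            · exact hme
          refine List.mem_cons_of_mem _ ((ih (PySem.Set.add s e.2) hl t r).mpr
            ⟨?_, hm2, fun f hf hft => hall f (List.mem_cons_of_mem _ hf) hft⟩)
          simp only [PySem.Set.contains, Bool.eq_false_iff, ne_eq,
            List.contains_iff_mem] at hcf ⊢
          intro hmm
          rcases (PySem.Set.mem_add _ _ _).mp hmm with hmm | hmm
          · exact hcf hmm
          · exact ht hmm.symm

-- ---- pvMin spec ----

theorem pv_minFrom_spec (l : List (Int × Int × Int)) :
    ∀ c, ∃ m, pvMin (some c) l = some m ∧ (m = c ∨ m ∈ l) ∧ (m = c ∨ pyLexLt3 m c = true) ∧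
      ∀ r ∈ l, r = m ∨ pyLexLt3 m r = true := by
  induction l with
  | nil => intro c; exact ⟨c, rfl, Or.inl rfl, Or.inl rfl, by simp⟩
  | cons r l ih =>
    intro c
    by_cases h : pyLexLt3 r c = true
    · obtain ⟨m, heq, hm, hmc, hall⟩ := ih r
      refine ⟨m, ?_, ?_, ?_, ?_⟩
      · rw [show pvMin (some c) (r :: l) = pvMin (some r) l from by simp [pvMin, h]]
        exact heq
      · rcases hm with rfl | hm
        · exact Or.inr List.mem_cons_self
        · exact Or.inr (List.mem_cons_of_mem _ hm)
      · rcases hmc with rfl | hmc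
        · exact Or.inr h
        · exact Or.inr (pv_lex_trans hmc h)
      · intro r' hr'
        rcases List.mem_cons.mp hr' with rfl | hr'
        · rcases hmc with rfl | hmc
          · exact Or.inl rfl
          · exact Or.inr hmc
        · exact hall r' hr'
    · obtain ⟨m, heq, hm, hmc, hall⟩ := ih c
      refine ⟨m, ?_, ?_, hmc, ?_⟩
      · rw [show pvMin (some c) (r :: l) = pvMin (some c) l from by simp [pvMin, h]]
        exact heq
      · rcases hm with rfl | hm
        · exact Or.inl rfl
        · exact Or.inr (List.mem_cons_of_mem _ hm)
      · intro r' hr'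
        rcases List.mem_cons.mp hr' with rfl | hr'
        · by_cases hrm : r' = m
          · exact Or.inl hrm
          · rcases pv_lex_total hrm with h1 | h1
            · exfalso
              rcases hmc with rfl | hmc
              · exact h h1
              · exact h (pv_lex_trans h1 hmc)
            · exact Or.inr h1
        · exact hall r' hr' 

theorem pv_min_spec (l : List (Int × Int × Int)) (r : Int × Int × Int) :
    pvMin none l = some r ↔ (r ∈ l ∧ ∀ r' ∈ l, r' = r ∨ pyLexLt3 r r' = true) := by
  constructor
  · intro h
    cases l with
    | nil => simp [pvMin] at h
    | cons r0 l =>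
      have heq : pvMin none (r0 :: l) = pvMin (some r0) l := by simp [pvMin]
      obtain ⟨m, hm1, hm2, hm3, hall⟩ := pv_minFrom_spec l r0
      rw [heq, hm1] at h
      obtain rfl : m = r := by simpa using h
      refine ⟨?_, ?_⟩
      · rcases hm2 with rfl | hm2
        · exact List.mem_cons_self
        · exact List.mem_cons_of_mem _ hm2
      · intro r' hr'
        rcases List.mem_cons.mp hr' with rfl | hr'
        · rcases hm3 with rfl | hm3
          · exact Or.inl rfl
          · exact Or.inr hm3
        · exact hall r' hr'
  · rintro ⟨hmem, hall⟩
    cases l with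
    | nil => simp at hmem
    | cons r0 l =>
      have heq : pvMin none (r0 :: l) = pvMin (some r0) l := by simp [pvMin]
      obtain ⟨m, hm1, hm2, hm3, hall'⟩ := pv_minFrom_spec l r0
      rw [heq, hm1]
      congr 1
      by_cases hmr : m = r
      · exact hmr
      · exfalso
        have hmmem : m ∈ r0 :: l := by
          rcases hm2 with rfl | hm2
          · exact List.mem_cons_self
          · exact List.mem_cons_of_mem _ hm2
        have h1 := hall m hmmem
        have h2 : r = m ∨ pyLexLt3 m r = true := by
          rcases List.mem_cons.mp hmem with rfl | hr
          · rcases hm3 with rfl | hm3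
            · exact Or.inl rfl
            · exact Or.inr hm3
          · exact hall' r hr
        rcases h1 with h1 | h1
        · exact hmr h1
        · rcases h2 with h2 | h2
          · exact hmr h2.symm
          · simp [pv_lex_asymm h1] at h2

-- ---- dict fold characterization ----

theorem pv_bestEq (l : List (Int × List (String × Int))) :
    ∀ d, l.foldl
      (fun (d : PySem.Dict Int (Int × Int × Int)) p =>
        match p.2.lookup "id" with
        | none => d
        | some tid =>
          if tid ≤ 0 then d
          else
            let r := pyRank p.1 p.2
            match d.get? tid with
            | none => d.insert tid r
            | some r0 => if pyLexLt3 r r0 then d.insert tid r else d) d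
      = (l.filterMap pvG).foldl pvStepB d := by
  induction l with
  | nil => intro d; rfl
  | cons p l ih =>
    intro d
    simp only [List.foldl_cons, List.filterMap_cons]
    cases h : p.2.lookup "id" with
    | none =>
      rw [show pvG p = none from by simp [pvG, pvVid, h]]
      simpa [h] using ih d
    | some tid =>
      by_cases h0 : tid ≤ 0
      · rw [show pvG p = none from by simp [pvG, pvVid, h, h0]]
        simpa [h, h0] using ih d
      · rw [show pvG p = some (pyRank p.1 p.2, tid) from by simp [pvG, pvVid, h, h0]]
        rw [List.foldl_cons, ih]
        congr 1
        simp [pvStepB, h0]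

theorem pv_vfold_get? (v : List ((Int × Int × Int) × Int)) :
    ∀ (d : PySem.Dict Int (Int × Int × Int)) t,
      (v.foldl pvStepB d).get? t = pvMin (d.get? t) (pvOcc v t) := by
  induction v with
  | nil => intro d t; rfl
  | cons e v ih =>
    intro d t
    simp only [List.foldl_cons]
    rw [ih (pvStepB d e) t]
    by_cases het : e.2 = t
    · subst het
      rw [show pvOcc (e :: v) e.2 = e.1 :: pvOcc v e.2 from by simp [pvOcc]]
      rw [show pvMin (d.get? e.2) (e.1 :: pvOcc v e.2)
          = pvMin (pvMin (d.get? e.2) [e.1]) (pvOcc v e.2) from by simp [pvMin]]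
      congr 1
      cases hg : d.get? e.2 with
      | none => simp [pvStepB, hg, pvMin, PySem.Dict.get?_insert_self]
      | some r0 =>
        by_cases hlt : pyLexLt3 e.1 r0 = true
        · simp [pvStepB, hg, hlt, pvMin, PySem.Dict.get?_insert_self]
        · simp [pvStepB, hg, hlt, pvMin]
    · rw [show pvOcc (e :: v) t = pvOcc v t from by simp [pvOcc, het]]
      congr 1
      have hne : t ≠ e.2 := fun hh => het hh.symm
      cases hg : d.get? e.2 with
      | none => simp [pvStepB, hg, PySem.Dict.get?_insert_of_ne _ _ hne]
      | some r0 =>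
        by_cases hlt : pyLexLt3 e.1 r0 = true
        · simp [pvStepB, hg, hlt, PySem.Dict.get?_insert_of_ne _ _ hne]
        · simp [pvStepB, hg, hlt]

theorem pv_keys_insert (d : PySem.Dict Int (Int × Int × Int)) (k : Int) (v : Int × Int × Int) :
    (d.insert k v).keys = if d.contains k = true then d.keys else d.keys ++ [k] := by
  by_cases hc : d.contains k = true
  · simp only [PySem.Dict.insert, hc, if_true, PySem.Dict.keys, List.map_map]
    apply List.map_congr_left
    intro p _
    by_cases hp : p.1 = k
    · simp [hp]
    · simp [hp]
  · simp [PySem.Dict.insert, hc, PySem.Dict.keys]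

theorem pv_nodup_keys_fold (v : List ((Int × Int × Int) × Int)) :
    ∀ (d : PySem.Dict Int (Int × Int × Int)), d.keys.Nodup → (v.foldl pvStepB d).keys.Nodup := by
  induction v with
  | nil => intro d h; exact h
  | cons e v ih =>
    intro d h
    refine ih _ ?_
    have hins : ∀ r : Int × Int × Int, (d.insert e.2 r).keys.Nodup := by
      intro r
      rw [pv_keys_insert]
      by_cases hc : d.contains e.2 = true
      · simp [hc, h]
      · have hnm : e.2 ∉ d.keys := fun hm => hc ((PySem.Dict.contains_iff_mem_keys d e.2).mpr hm)
        simp only [hc, if_false, List.nodup_append, Bool.false_eq_true]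
        refine ⟨h, by simp, ?_⟩
        intro a ha b hb
        simp only [List.mem_singleton] at hb
        subst hb
        exact fun hab => hnm (hab ▸ ha)
    cases hg : d.get? e.2 with
    | none => simpa [pvStepB, hg] using hins e.1
    | some r0 =>
      by_cases hlt : pyLexLt3 e.1 r0 = true
      · simpa [pvStepB, hg, hlt] using hins e.1
      · simpa [pvStepB, hg, hlt] using h

theorem pv_mem_items_iff_get? (d : PySem.Dict Int (Int × Int × Int)) (hnd : d.keys.Nodup)
    (t : Int) (r : Int × Int × Int) : (t, r) ∈ d.items ↔ d.get? t = some r := by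
  obtain ⟨l⟩ := d
  induction l with
  | nil => simp [PySem.Dict.get?]
  | cons p l ih =>
    obtain ⟨k, v⟩ := p
    have hnd2 := hnd
    simp only [PySem.Dict.keys, List.map_cons, List.nodup_cons] at hnd2
    obtain ⟨hknot, hndl⟩ := hnd2
    rw [PySem.Dict.get?_mk_cons]
    by_cases hk : k = t
    · subst hk
      simp only [beq_self_eq_true, if_true]
      show (k, r) ∈ (k, v) :: l ↔ some v = some r
      constructor
      · intro hm
        rcases List.mem_cons.mp hm with hme | hme
        · obtain ⟨-, rfl⟩ : k = k ∧ r = v := by simpa [Prod.ext_iff] using hme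
          rfl
        · exact absurd (List.mem_map.mpr ⟨(k, r), hme, rfl⟩) hknot
      · intro hm
        obtain rfl : v = r := by simpa using hm
        exact List.mem_cons_self
    · have hbk : (k == t) = false := by simp [hk]
      rw [hbk]
      simp only [Bool.false_eq_true, if_false]
      rw [← ih (by simpa [PySem.Dict.keys] using hndl)]
      show (t, r) ∈ (k, v) :: l ↔ (t, r) ∈ l
      constructor
      · intro hm
        rcases List.mem_cons.mp hm with hme | hme
        · exact absurd ((by simpa [Prod.ext_iff] using hme : t = k ∧ r = v)).1.symm hk
        · exact hme
      · exact List.mem_cons_of_mem _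

-- ---- pvW facts ----

theorem pv_V_bounds (items : List (List (String × Int))) :
    ∀ e ∈ pvV items, (e.1.2.1 = 0 ∨ e.1.2.1 = 1) ∧ 0 ≤ e.1.2.2 ∧ e.1.2.2 < (items.length : Int) := by
  intro e he
  obtain ⟨p, hp, hg⟩ := List.mem_filterMap.mp he
  have h1 := (pv_G_inv hg).2
  have hb := pv_enum_bounds items 0 p hp
  constructor
  · rw [h1]; unfold pyRank; cases p.2.lookup "index" <;> simp
  · rw [h1]; unfold pyRank; cases p.2.lookup "index" <;> simp <;> omega

theorem pv_V_pairwise_idx (items : List (List (String × Int))) :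
    (pvV items).Pairwise (fun e f => e.1.2.2 < f.1.2.2) := by
  unfold pvV
  rw [List.pairwise_filterMap]
  refine (pv_enum_pairwise items 0).imp ?_
  intro p q h e he f hf
  rw [(pv_G_inv he).2, (pv_G_inv hf).2]
  unfold pyRank
  cases p.2.lookup "index" <;> cases q.2.lookup "index" <;> simpa using h

theorem pv_W_pairwise_lex (items : List (List (String × Int))) :
    (pvW items).Pairwise (fun e f => pyLexLt3 e.1 f.1 = true) := by
  have hle := PySem.List.sorted_pairwise (pvV items) (fun e => pvEnc (items.length : Int) e.1)
  have hperm := PySem.List.sorted_perm (pvV items) (fun e => pvEnc (items.length : Int) e.1) false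
  have hbounds := pv_V_bounds items
  have hpneV : (pvV items).Pairwise
      (fun e f => pvEnc (items.length : Int) e.1 ≠ pvEnc (items.length : Int) f.1) := by
    refine (pv_V_pairwise_idx items).imp_of_mem ?_
    intro e f he hf hlt heq
    obtain ⟨hbe1, hbe2, hbe3⟩ := hbounds e he
    obtain ⟨hbf1, hbf2, hbf3⟩ := hbounds f hf
    unfold pvEnc at heq
    have := (pv_key_eq_iff hbe2 hbe3 hbf2 hbf3).mp heq
    omega
  have hnodupV : ((pvV items).map (fun e => pvEnc (items.length : Int) e.1)).Nodup :=
    List.pairwise_map.mpr hpneV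
  have hnodupW := (List.Perm.nodup_iff (hperm.map
    (fun e => pvEnc (items.length : Int) e.1))).mpr hnodupV
  have hneW := List.pairwise_map.mp hnodupW
  unfold pvW
  refine (hle.and hneW).imp_of_mem ?_
  intro e f he hf h
  obtain ⟨h1, h2⟩ := h
  have heV := hperm.subset he
  have hfV := hperm.subset hf
  obtain ⟨hbe1, hbe2, hbe3⟩ := hbounds e heV
  obtain ⟨hbf1, hbf2, hbf3⟩ := hbounds f hfV
  exact (pv_enc_lt_iff_lex hbe1 hbf1 hbe2 hbe3 hbf2 hbf3).mp (lt_of_le_of_ne h1 h2)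

-- ---- B's final sort: uniqueness of the strictly ordered arrangement ----

theorem pv_insertBy_perm (x : γ) (l : List γ) (bf : γ → γ → Bool) :
    (PySem.List.insertBy bf x l).Perm (x :: l) := by
  induction l with
  | nil => simp [PySem.List.insertBy]
  | cons y l ih =>
    by_cases h : bf x y = true
    · simp [PySem.List.insertBy, h]
    · rw [show PySem.List.insertBy bf x (y :: l) = y :: PySem.List.insertBy bf x l from by
        simp [PySem.List.insertBy, h]]
      exact (ih.cons y).trans (List.Perm.swap x y l)

theorem pv_sortfold_perm (l : List (Int × (Int × Int × Int))) :
    ∀ acc, (l.foldl (fun acc kv => PySem.List.insertBy (fun a b => pyLexLt3 a.2 b.2) kv acc) acc).Perm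
      (acc ++ l) := by
  induction l with
  | nil => intro acc; simp
  | cons x l ih =>
    intro acc
    simp only [List.foldl_cons]
    refine (ih _).trans ?_
    refine (List.Perm.append_right l (pv_insertBy_perm x acc _)).trans ?_
    exact List.perm_middle.symm

theorem pv_insertBy_pairwise (x : Int × (Int × Int × Int)) (acc : List (Int × (Int × Int × Int)))
    (h : acc.Pairwise (fun a b => pyLexLt3 b.2 a.2 = false)) :
    (PySem.List.insertBy (fun a b => pyLexLt3 a.2 b.2) x acc).Pairwise
      (fun a b => pyLexLt3 b.2 a.2 = false) := by
  induction acc with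
  | nil => simp [PySem.List.insertBy]
  | cons q acc ih =>
    rcases List.pairwise_cons.mp h with ⟨hq, hacc⟩
    by_cases hbc : pyLexLt3 x.2 q.2 = true
    · rw [show PySem.List.insertBy (fun a b => pyLexLt3 a.2 b.2) x (q :: acc) = x :: q :: acc from by
        simp [PySem.List.insertBy, hbc]]
      refine List.pairwise_cons.mpr ⟨?_, h⟩
      intro w hw
      rcases List.mem_cons.mp hw with rfl | hw
      · exact pv_lex_asymm hbc
      · by_contra hcon
        have hwt : pyLexLt3 w.2 x.2 = true := by simpa using hcon
        have := pv_lex_trans hwt hbc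
        simp [hq w hw] at this
    · rw [show PySem.List.insertBy (fun a b => pyLexLt3 a.2 b.2) x (q :: acc)
          = q :: PySem.List.insertBy (fun a b => pyLexLt3 a.2 b.2) x acc from by
        simp [PySem.List.insertBy, hbc]]
      refine List.pairwise_cons.mpr ⟨?_, ih hacc⟩
      intro w hw
      rcases (PySem.List.mem_insertBy _ _ _ _).mp hw with rfl | hw
      · simpa using hbc
      · exact hq w hw

theorem pv_sortfold_pairwise (l : List (Int × (Int × Int × Int))) :
    ∀ acc, acc.Pairwise (fun a b => pyLexLt3 b.2 a.2 = false) →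
      (l.foldl (fun acc kv => PySem.List.insertBy (fun a b => pyLexLt3 a.2 b.2) kv acc) acc).Pairwise
        (fun a b => pyLexLt3 b.2 a.2 = false) := by
  induction l with
  | nil => intro acc h; simpa using h
  | cons x l ih =>
    intro acc h
    simp only [List.foldl_cons]
    exact ih _ (pv_insertBy_pairwise x acc h)

theorem pv_sort_eq_out (l out : List (Int × (Int × Int × Int)))
    (hpw : out.Pairwise (fun a b => pyLexLt3 a.2 b.2 = true)) (hperm : out.Perm l) :
    l.foldl (fun acc kv => PySem.List.insertBy (fun a b => pyLexLt3 a.2 b.2) kv acc) [] = out := by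
  have hperm2 : (l.foldl (fun acc kv => PySem.List.insertBy (fun a b => pyLexLt3 a.2 b.2) kv acc)
      []).Perm l := by simpa using pv_sortfold_perm l []
  have hpw2 := pv_sortfold_pairwise l [] (by simp)
  have hnodv : (out.map (·.2)).Nodup := by
    apply List.pairwise_map.mpr
    refine hpw.imp ?_
    intro a b hab he
    rw [he] at hab
    simp [pv_lex_irrefl] at hab
  have hnodl : (l.map (·.2)).Nodup := (List.Perm.nodup_iff ((hperm.map (·.2)))).mp hnodv
  have hnodres := (List.Perm.nodup_iff (hperm2.map (·.2))).mpr hnodl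
  have hneres := List.pairwise_map.mp hnodres
  have hstrict : (l.foldl (fun acc kv => PySem.List.insertBy (fun a b => pyLexLt3 a.2 b.2) kv acc)
      []).Pairwise (fun a b => pyLexLt3 a.2 b.2 = true) := by
    refine (hpw2.and hneres).imp ?_
    rintro a b ⟨h1, h2⟩
    rcases pv_lex_total h2 with h3 | h3
    · exact h3
    · exact absurd h3 (by simp [h1])
  refine List.Perm.eq_of_pairwise ?_ hstrict hpw (hperm2.trans hperm.symm)
  intro a b _ _ hab hba
  exact absurd hba (by simp [pv_lex_asymm hab])

-- ---- membership bridges ----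

theorem pv_occ_mem (v : List ((Int × Int × Int) × Int)) (t : Int) (r : Int × Int × Int) :
    r ∈ pvOcc v t ↔ (r, t) ∈ v := by
  unfold pvOcc
  rw [List.mem_filterMap]
  constructor
  · rintro ⟨⟨e1, e2⟩, he, hsome⟩
    by_cases h2 : e2 = t
    · obtain rfl : e1 = r := by simpa [h2] using hsome
      subst h2
      exact he
    · simp [h2] at hsome
  · intro h
    exact ⟨(r, t), h, by simp⟩

-- ---- the two assemblies ----

theorem pv_A_eq (items : List (List (String × Int))) :
    token_ids_from_import_items_py items = (pvFo (pvW items) PySem.Set.empty).map (·.1) := by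
  unfold token_ids_from_import_items_py
  rw [pv_sorted2_eq, pv_stab_main, pv_foldA_eq, pv_goA_map_fo, pv_SV_eq_W]
  simp

theorem pv_B_eq (items : List (List (String × Int))) :
    token_ids_from_import_items_py_alt items = (pvFo (pvW items) PySem.Set.empty).map (·.1) := by
  have hD : ((PySem.List.enumerate items).foldl
      (fun (d : PySem.Dict Int (Int × Int × Int)) p =>
        match p.2.lookup "id" with
        | none => d
        | some tid =>
          if tid ≤ 0 then d
          else
            let r := pyRank p.1 p.2
            match d.get? tid with
            | none => d.insert tid r
            | some r0 => if pyLexLt3 r r0 then d.insert tid r else d)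
      PySem.Dict.empty) = (pvV items).foldl pvStepB PySem.Dict.empty := pv_bestEq _ _
  unfold token_ids_from_import_items_py_alt
  rw [hD]
  have hkn : ((pvV items).foldl pvStepB PySem.Dict.empty).keys.Nodup :=
    pv_nodup_keys_fold _ _ (by simp [PySem.Dict.empty, PySem.Dict.keys])
  have hget : ∀ t, ((pvV items).foldl pvStepB PySem.Dict.empty).get? t
      = pvMin none (pvOcc (pvV items) t) := fun t => pv_vfold_get? (pvV items) PySem.Dict.empty t
  have hmemW : ∀ (e : (Int × Int × Int) × Int), e ∈ pvW items ↔ e ∈ pvV items := by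
    intro e; unfold pvW; exact PySem.List.mem_sorted _ _ _ _
  have hmemiff : ∀ (t : Int) (r : Int × Int × Int),
      ((t, r) ∈ ((pvV items).foldl pvStepB PySem.Dict.empty).items
        ↔ (t, r) ∈ pvFo (pvW items) PySem.Set.empty) := by
    intro t r
    rw [pv_mem_items_iff_get? _ hkn, hget t, pv_min_spec,
      pv_fo_mem_iff (pvW items) PySem.Set.empty (pv_W_pairwise_lex items)]
    have hcs : PySem.Set.contains PySem.Set.empty t = false := rfl
    rw [hcs]
    simp only [true_and]
    constructor
    · rintro ⟨h1, h2⟩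
      refine ⟨(hmemW (r, t)).mpr ((pv_occ_mem _ _ _).mp h1), ?_⟩
      intro e heW h2t
      have h3 : e.1 ∈ pvOcc (pvV items) t := by
        refine (pv_occ_mem _ _ _).mpr ?_
        have heV := (hmemW e).mp heW
        rw [← h2t]
        simpa using heV
      exact h2 e.1 h3
    · rintro ⟨h1, h2⟩
      refine ⟨(pv_occ_mem _ _ _).mpr ((hmemW (r, t)).mp h1), ?_⟩
      intro r' hr'
      have hrW : (r', t) ∈ pvW items := (hmemW (r', t)).mpr ((pv_occ_mem _ _ _).mp hr')
      exact h2 (r', t) hrW rfl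
  have hfopw := pv_fo_pairwise PySem.Set.empty (pv_W_pairwise_lex items)
  have hfond : (pvFo (pvW items) PySem.Set.empty).Nodup := by
    refine hfopw.imp ?_
    intro a b hab he
    rw [he] at hab
    simp [pv_lex_irrefl] at hab
  have hDnd : ((pvV items).foldl pvStepB PySem.Dict.empty).items.Nodup :=
    List.Nodup.of_map _ hkn
  have hperm : (pvFo (pvW items) PySem.Set.empty).Perm
      ((pvV items).foldl pvStepB PySem.Dict.empty).items := by
    refine (List.perm_ext_iff_of_nodup hfond hDnd).mpr ?_
    rintro ⟨t, r⟩
    exact (hmemiff t r).symm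
  show (((List.foldl pvStepB PySem.Dict.empty (pvV items)).items.foldl
      (fun acc kv => PySem.List.insertBy (fun a b => pyLexLt3 a.2 b.2) kv acc) []).map (·.1))
    = (pvFo (pvW items) PySem.Set.empty).map (·.1)
  rw [pv_sort_eq_out _ _ hfopw hperm]

-- ===== VERDICT (by name: the statement is the Claim_ definition above) =====
theorem token_ids_from_import_items_py_spec : Claim_equal_token_ids_from_import_items_py := by
  intro items _
  unfold Spec_token_ids_from_import_items_py
  rw [pv_A_eq, pv_B_eq]
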